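-- pv_equiv track=rewrite | github.com/pypi-data/pypi-mirror-339 | packages/yo-fluq-ds/yo_fluq_ds-2.0.7-py3-none-any.whl/yo_fluq_ds/_queryable_helpers/combinatorics.py | triangle_iter
-- ===== SOURCE A (Python) =====
-- def triangle_iter(items,with_diagonal):
--     for index1,item1 in enumerate(items):
--         begin = index1
--         if not with_diagonal:
--             begin+=1
--         for index2 in range(begin,len(items)):
--             item2=items[index2]
--             yield (item1,item2)
-- ===== SOURCE B (Python) =====
-- def triangle_iter(items, with_diagonal):
--     # Single reversed pass: maintain the suffix of already-seen (later) elements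
--     # as each element's partners, collect per-element pair blocks, and emit the
--     # blocks in reverse (i.e. original) order — the output is built back-to-front.
--     blocks = []
--     suffix = []
--     for x in reversed(items):
--         block = [(x, y) for y in suffix]
--         if with_diagonal:
--             block.insert(0, (x, x))
--         blocks.append(block)
--         suffix.insert(0, x)
--     for block in reversed(blocks):
--         yield from block
-- ===== Notes on version B (the rewrite author's own statement) =====
-- stated objective: alternative
-- what changed: Replaces the nested forward index loops with a single reversed pass that maintains a suffix accumulator of later elements and builds the output back-to-front by prepending each element's pair block.
import Mathlib
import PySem

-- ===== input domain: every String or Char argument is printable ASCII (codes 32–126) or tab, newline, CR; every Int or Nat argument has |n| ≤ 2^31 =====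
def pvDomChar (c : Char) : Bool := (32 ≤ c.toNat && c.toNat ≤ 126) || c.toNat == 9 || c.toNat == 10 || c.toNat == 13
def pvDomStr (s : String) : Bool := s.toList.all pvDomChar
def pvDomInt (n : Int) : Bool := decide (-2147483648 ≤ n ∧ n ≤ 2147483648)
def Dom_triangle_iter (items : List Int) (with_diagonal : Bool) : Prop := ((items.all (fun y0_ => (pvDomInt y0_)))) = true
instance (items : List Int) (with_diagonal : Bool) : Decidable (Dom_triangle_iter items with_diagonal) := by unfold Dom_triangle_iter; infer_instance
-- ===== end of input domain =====

-- B replaces A's nested forward index loops by a single reversed pass with a suffix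
-- accumulator, building the same pair list back-to-front (same pairs, same order).

-- ===== PORT A =====
-- generator: the list of yielded pairs, in yield order
def triangle_iter (items : List Int) (with_diagonal : Bool) : List (Int × Int) :=
  (PySem.List.enumerate items).foldl (fun acc p =>
    let begin_ : Int := if !with_diagonal then p.1 + 1 else p.1
    acc ++ (PySem.List.pyRange begin_ (items.length : Int) 1).map
      (fun j => (p.2, PySem.List.pyGetD items j 0))) []

-- ===== PORT B =====
-- single pass over reversed(items), state = (blocks collected so far, suffix of seen elements);
-- then the blocks are emitted in reverse order
def triangle_iter_alt (items : List Int) (with_diagonal : Bool) : List (Int × Int) :=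
  let st := items.reverse.foldl (fun st x =>
    let block := st.2.map (fun y => (x, y))
    let block := if with_diagonal then (x, x) :: block else block
    (st.1 ++ [block], x :: st.2))
    (([] : List (List (Int × Int))), ([] : List Int))
  st.1.reverse.flatMap id

-- ===== PRECONDITION & SPEC =====
def Spec_triangle_iter (items : List Int) (with_diagonal : Bool) (out : List (Int × Int)) : Prop := out = triangle_iter_alt items with_diagonal
instance (items : List Int) (with_diagonal : Bool) (out : List (Int × Int)) : Decidable (Spec_triangle_iter items with_diagonal out) := by unfold Spec_triangle_iter; infer_instance

-- ===== CLAIM (what is proved, stated in full; the proofs are below) =====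
def Claim_equal_triangle_iter : Prop := ∀ (items : List Int) (with_diagonal : Bool), Dom_triangle_iter items with_diagonal → Spec_triangle_iter items with_diagonal (triangle_iter items with_diagonal)

-- ===== LEMMAS AND PROOFS =====

-- reference structural recursion both ports are reduced to
def pvTri (wd : Bool) : List Int → List (Int × Int)
  | [] => []
  | x :: xs => (if wd then x :: xs else xs).map (fun y => (x, y)) ++ pvTri wd xs

-- A's fold, with the inner index loop rewritten to a drop of the list
theorem triangle_iter_eq_flatMap (items : List Int) (with_diagonal : Bool) :
    triangle_iter items with_diagonal =
      (PySem.List.enumerate items).flatMap (fun p =>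
        ((items.drop ((if !with_diagonal then p.1 + 1 else p.1).toNat)).map (fun y => (p.2, y)))) := by
  unfold triangle_iter
  rw [PySem.List.foldl_congr_mem (g := fun acc p =>
    acc ++ (items.drop ((if !with_diagonal then p.1 + 1 else p.1).toNat)).map (fun y => (p.2, y)))]
  · rw [PySem.List.foldl_append_eq_flatMap]; simp
  · intro acc p hp
    obtain ⟨k, hk, rfl⟩ := (PySem.List.mem_enumerate_iff _ _ _).mp hp
    have h0 : (0:Int) ≤ (if !with_diagonal then ((0:Int) + k) + 1 else ((0:Int) + k)) := by
      split <;> omega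
    have := PySem.List.map_pyGetD_pyRange' (xs := items)
      (a := if !with_diagonal then ((0:Int) + k) + 1 else ((0:Int) + k)) (d := 0) h0
    simp only []
    rw [show (fun j => ((items[k] : Int), PySem.List.pyGetD items j 0)) = ((fun y => ((items[k] : Int), y)) ∘ (fun j => PySem.List.pyGetD items j 0)) from rfl, ← List.map_map, this]

-- without the diagonal: A's traversal is pvTri false
theorem comb_shift_true : ∀ (xs pre : List Int),
    (PySem.List.enumerate xs (pre.length : Int)).flatMap (fun p =>
      ((pre ++ xs).drop ((p.1 + 1).toNat)).map (fun y => (p.2, y))) = pvTri false xs := by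
  intro xs
  induction xs with
  | nil => intro pre; simp [PySem.List.enumerate, pvTri]
  | cons x xs ih =>
    intro pre
    rw [PySem.List.enumerate_cons, List.flatMap_cons]
    have happ : pre ++ x :: xs = (pre ++ [x]) ++ xs := by simp
    have hpre : ((pre.length : Int) + 1) = (((pre ++ [x]).length : Int)) := by simp
    simp only [happ, hpre]
    rw [ih (pre ++ [x])]
    have hd1 : (((pre ++ [x]) ++ xs).drop ((((pre ++ [x]).length : Int)).toNat)) = xs := by
      simp
    rw [hd1]; rfl

-- with the diagonal: A's traversal is pvTri true
theorem comb_shift_false : ∀ (xs pre : List Int),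
    (PySem.List.enumerate xs (pre.length : Int)).flatMap (fun p =>
      ((pre ++ xs).drop (p.1.toNat)).map (fun y => (p.2, y))) = pvTri true xs := by
  intro xs
  induction xs with
  | nil => intro pre; simp [PySem.List.enumerate, pvTri]
  | cons x xs ih =>
    intro pre
    rw [PySem.List.enumerate_cons, List.flatMap_cons]
    have happ : pre ++ x :: xs = (pre ++ [x]) ++ xs := by simp
    have hpre : ((pre.length : Int) + 1) = (((pre ++ [x]).length : Int)) := by simp
    simp only [happ, hpre]
    rw [ih (pre ++ [x])]
    have hd0 : (((pre ++ [x]) ++ xs).drop (((pre.length : Int)).toNat)) = x :: xs := by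
      have h2 : ((pre ++ [x]) ++ xs) = pre ++ (x :: xs) := by simp
      have h3 : ((pre.length : Int)).toNat = pre.length := by simp
      rw [h2, h3, List.drop_left' rfl]
    rw [hd0]; simp [pvTri]

-- B's reversed fold: the suffix component is the list itself, and the collected
-- blocks, reversed and flattened, are pvTri
theorem alt_fold_eq (wd : Bool) : ∀ (xs : List Int),
    (xs.reverse.foldl (fun st x =>
      (st.1 ++ [if wd then (x, x) :: st.2.map (fun y => (x, y)) else st.2.map (fun y => (x, y))],
       x :: st.2))
      (([] : List (List (Int × Int))), ([] : List Int))).2 = xs ∧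
    ((xs.reverse.foldl (fun st x =>
      (st.1 ++ [if wd then (x, x) :: st.2.map (fun y => (x, y)) else st.2.map (fun y => (x, y))],
       x :: st.2))
      (([] : List (List (Int × Int))), ([] : List Int))).1.reverse.flatMap id = pvTri wd xs) := by
  intro xs
  rw [List.foldl_reverse]
  induction xs with
  | nil => exact ⟨rfl, by simp [pvTri]⟩
  | cons x xs ih =>
    obtain ⟨h2, h1⟩ := ih
    simp only [List.foldr_cons, h2]
    refine ⟨by simp, ?_⟩
    rw [List.reverse_append, List.reverse_singleton, List.singleton_append,
        List.flatMap_cons, h1]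
    cases wd <;> simp [pvTri, id]

theorem alt_eq_tri (items : List Int) (wd : Bool) :
    triangle_iter_alt items wd = pvTri wd items := by
  have h := alt_fold_eq wd items
  unfold triangle_iter_alt
  simp only []
  exact h.2

-- ===== VERDICT (by name: the statement is the Claim_ definition above) =====
theorem triangle_iter_spec : Claim_equal_triangle_iter := by
  intro items wd _
  unfold Spec_triangle_iter
  rw [alt_eq_tri, triangle_iter_eq_flatMap]
  cases wd with
  | true =>
    have := comb_shift_false items []
    simp only [List.nil_append, List.length_nil, Int.natCast_zero] at this
    simpa using this
  | false =>
    have := comb_shift_true items []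
    simp only [List.nil_append, List.length_nil, Int.natCast_zero] at this
    simpa using this
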